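-- pv_equiv track=rewrite | github.com/SaiNageswarS/LLMDocSearch | ChunkPdf.py | __sanitize_word_breaks__
-- ===== SOURCE A (Python) =====
-- def __sanitize_word_breaks__(paragraph: str):
--     lines = paragraph.split("\n")
--     cleaned_para = ""
--
--     for line in lines:
--         if cleaned_para.endswith("-"):
--             cleaned_para = cleaned_para[0:len(cleaned_para) - 1] + line
--         else:
--             cleaned_para = cleaned_para + " " + line
--
--     return cleaned_para.strip()
-- ===== SOURCE B (Python) =====
-- def __sanitize_word_breaks__(paragraph: str):
--     out = []
--     for ch in paragraph:
--         if ch == "\n":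
--             if out and out[-1] == "-":
--                 out.pop()
--             else:
--                 out.append(" ")
--         else:
--             out.append(ch)
--     return "".join(out).strip()
-- ===== Notes on version B (the rewrite author's own statement) =====
-- stated objective: alternative
-- what changed: Replaces A's per-line fold (split on newline, trailing-hyphen test, slice-and-concatenate accumulator) by a single character-level pass that, at each newline, either pops a pending hyphen off the output or emits a space; no split pass and no accumulator slicing.
import Mathlib
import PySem

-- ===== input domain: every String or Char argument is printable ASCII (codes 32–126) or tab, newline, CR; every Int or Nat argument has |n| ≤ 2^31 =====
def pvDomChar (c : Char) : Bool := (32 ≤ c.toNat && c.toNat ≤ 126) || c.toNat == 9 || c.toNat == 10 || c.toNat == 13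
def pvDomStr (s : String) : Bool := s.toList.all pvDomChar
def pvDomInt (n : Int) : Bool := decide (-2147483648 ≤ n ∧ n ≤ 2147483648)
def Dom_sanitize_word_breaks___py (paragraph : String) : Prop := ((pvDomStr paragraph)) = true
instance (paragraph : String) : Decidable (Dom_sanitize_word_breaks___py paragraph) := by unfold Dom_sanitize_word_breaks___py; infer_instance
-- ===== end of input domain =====

-- B replaces A's per-line accumulator (with endswith test and slicing) by a single
-- character-level pass that pops a pending hyphen at each newline (objective: alternative).

-- ===== PORT A =====
-- literal transliteration of __sanitize_word_breaks__ (split on "\n", fold the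
-- accumulate/merge branch over the lines, strip at the end)
def sanitize_word_breaks___py (paragraph : String) : String :=
  String.ofList (PySem.Chars.strip
    ((PySem.Chars.splitOn paragraph.toList ['\n']).foldl
      (fun cleaned_para line =>
        if PySem.Chars.endswith cleaned_para ['-'] then
          PySem.Chars.slice cleaned_para (some 0)
            (some ((PySem.Chars.len cleaned_para : Int) - 1)) ++ line
        else
          cleaned_para ++ [' '] ++ line) []))

-- ===== PORT B =====
-- B's loop body: one character at a time; a newline pops a pending '-' or becomes a space
def pvBStep (out : List Char) (ch : Char) : List Char :=
  if ch = '\n' then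
    if out ≠ [] ∧ out.getLast? = some '-' then out.dropLast else out ++ [' ']
  else out ++ [ch]

def sanitize_word_breaks___py_alt (paragraph : String) : String :=
  String.ofList (PySem.Chars.strip (paragraph.toList.foldl pvBStep []))

-- ===== PRECONDITION & SPEC =====
def Spec_sanitize_word_breaks___py (paragraph : String) (out : String) : Prop := out = sanitize_word_breaks___py_alt paragraph
instance (paragraph : String) (out : String) : Decidable (Spec_sanitize_word_breaks___py paragraph out) := by unfold Spec_sanitize_word_breaks___py; infer_instance

-- ===== CLAIM (what is proved, stated in full; the proofs are below) =====
def Claim_equal_sanitize_word_breaks___py : Prop := ∀ (paragraph : String), Dom_sanitize_word_breaks___py paragraph → Spec_sanitize_word_breaks___py paragraph (sanitize_word_breaks___py paragraph)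

-- ===== LEMMAS AND PROOFS =====

-- A's loop body as a plain function on char lists
def pvAStep (cp line : List Char) : List Char :=
  if cp.getLast? = some '-' then cp.dropLast ++ line else cp ++ ' ' :: line

-- reference splitter: split a char list on '\n' (back-to-front recursion)
def pvSplitNL : List Char → List (List Char)
  | [] => [[]]
  | c :: rest =>
    if c = '\n' then [] :: pvSplitNL rest
    else (c :: (pvSplitNL rest).headI) :: (pvSplitNL rest).tail

lemma pvSplitNL_ne_nil (cs : List Char) : pvSplitNL cs ≠ [] := by
  cases cs with
  | nil => simp [pvSplitNL]
  | cons c rest => simp only [pvSplitNL]; split <;> simp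

-- prepend a prefix onto the first piece
def pvPrep (p : List Char) : List (List Char) → List (List Char)
  | [] => [p]
  | l :: ls => (p ++ l) :: ls

lemma pvPrep_nil (ls : List (List Char)) (h : ls ≠ []) : pvPrep [] ls = ls := by
  cases ls with
  | nil => exact absurd rfl h
  | cons l ls => simp [pvPrep]

lemma pvGo_spec (fuel : Nat) :
    ∀ (l cur : List Char) (acc : List (List Char)), l.length ≤ fuel →
      PySem.Chars.splitOn.go ['\n'] fuel l cur acc
        = acc.reverse ++ pvPrep cur.reverse (pvSplitNL l) := by
  induction fuel with
  | zero =>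
    intro l cur acc hl
    have : l = [] := List.length_eq_zero_iff.mp (Nat.le_zero.mp hl)
    subst this
    rw [PySem.Chars.splitOn.go.eq_def]
    simp [pvSplitNL, pvPrep]
  | succ fuel ih =>
    intro l cur acc hl
    cases l with
    | nil =>
      rw [PySem.Chars.splitOn.go.eq_def]
      simp [pvSplitNL, pvPrep]
    | cons c rest =>
      rw [PySem.Chars.splitOn.go.eq_def]
      show (if List.isPrefixOf ['\n'] (c :: rest) = true then
          PySem.Chars.splitOn.go ['\n'] fuel
            (List.drop (['\n'] : List Char).length (c :: rest)) [] (cur.reverse :: acc)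
        else PySem.Chars.splitOn.go ['\n'] fuel rest (c :: cur) acc) = _
      by_cases hc : c = '\n'
      · subst hc
        have hpre : List.isPrefixOf ['\n'] ('\n' :: rest) = true := by
          simp [List.isPrefixOf]
        rw [if_pos hpre,
          show List.drop (['\n'] : List Char).length ('\n' :: rest) = rest from rfl,
          ih rest [] (cur.reverse :: acc) (by simpa using Nat.succ_le_succ_iff.mp hl)]
        simp only [List.reverse_nil]
        rw [pvPrep_nil _ (pvSplitNL_ne_nil rest)]
        simp [pvSplitNL, pvPrep]
      · have hpre : ¬ List.isPrefixOf ['\n'] (c :: rest) = true := by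
          simp [List.isPrefixOf, beq_iff_eq]
          intro h
          exact absurd h.symm hc
        rw [if_neg hpre, ih rest (c :: cur) acc (by simpa using Nat.succ_le_succ_iff.mp hl)]
        simp only [pvSplitNL, if_neg hc, List.reverse_cons, pvPrep]
        obtain ⟨q, qs, hq⟩ := List.exists_cons_of_ne_nil (pvSplitNL_ne_nil rest)
        simp [hq]

lemma pvSplitOn_newline (cs : List Char) :
    PySem.Chars.splitOn cs ['\n'] = pvSplitNL cs := by
  show PySem.Chars.splitOn.go ['\n'] (cs.length + 1) cs [] [] = _
  rw [pvGo_spec (cs.length + 1) cs [] [] (by omega)]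
  simp [pvPrep_nil _ (pvSplitNL_ne_nil cs)]

-- the pieces of pvSplitNL contain no '\n'
lemma pvSplitNL_no_nl (cs : List Char) : ∀ l ∈ pvSplitNL cs, '\n' ∉ l := by
  induction cs with
  | nil => simp [pvSplitNL]
  | cons c rest ih =>
    intro l hl
    simp only [pvSplitNL] at hl
    split at hl
    · rcases List.mem_cons.mp hl with rfl | h
      · simp
      · exact ih l h
    · rename_i hc
      rcases List.mem_cons.mp hl with rfl | h
      · intro hmem
        rcases List.mem_cons.mp hmem with hh | hh
        · exact hc hh.symm
        · refine ih _ ?_ hh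
          obtain ⟨q, qs, hq⟩ := List.exists_cons_of_ne_nil (pvSplitNL_ne_nil rest)
          rw [hq]
          simp
      · exact ih l (List.mem_of_mem_tail h)

-- joining the pieces back with '\n' gives the input
lemma pvSplitNL_join (cs : List Char) :
    cs = (pvSplitNL cs).headI
      ++ (((pvSplitNL cs).tail).map (fun l => '\n' :: l)).flatten := by
  induction cs with
  | nil => simp [pvSplitNL]
  | cons c rest ih =>
    simp only [pvSplitNL]
    split
    · rename_i hc
      subst hc
      obtain ⟨q, qs, hq⟩ := List.exists_cons_of_ne_nil (pvSplitNL_ne_nil rest)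
      rw [hq] at ih ⊢
      simp only [List.headI_cons, List.tail_cons, List.map_cons, List.flatten_cons] at ih ⊢
      simp [ih]
    · simp only [List.headI_cons, List.tail_cons, List.cons_append]
      rw [← ih]

-- B's fold over a hyphen-free line just appends it
lemma pvBStep_line (l : List Char) (hl : '\n' ∉ l) :
    ∀ out, List.foldl pvBStep out l = out ++ l := by
  induction l with
  | nil => simp
  | cons c rest ih =>
    intro out
    have hc : c ≠ '\n' := fun h => hl (by simp [h])
    have hrest : '\n' ∉ rest := fun h => hl (by simp [h])
    simp only [List.foldl_cons, pvBStep, if_neg hc]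
    rw [ih hrest]
    simp

-- A's step on a ' '-headed accumulator is B's newline step followed by the line
lemma pvStep_shift (out l : List Char) (hl : '\n' ∉ l) :
    pvAStep (' ' :: out) l = ' ' :: List.foldl pvBStep (pvBStep out '\n') l := by
  rw [pvBStep_line l hl]
  cases out with
  | nil => simp [pvAStep, pvBStep]
  | cons o os =>
    simp only [pvAStep, pvBStep, if_true]
    by_cases h : (o :: os).getLast? = some '-'
    · have hne : (o :: os) ≠ ([] : List Char) := by simp
      simp [h, hne, List.dropLast_cons_of_ne_nil hne]
    · have : (' ' :: o :: os).getLast? = (o :: os).getLast? := by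
        simp [List.getLast?_cons_cons]
      simp [h, this]

-- the accumulator invariant over the remaining lines
lemma pvInv (ls : List (List Char)) :
    ∀ out, (∀ l ∈ ls, '\n' ∉ l) →
      List.foldl pvAStep (' ' :: out) ls
        = ' ' :: List.foldl (fun o l => List.foldl pvBStep (pvBStep o '\n') l) out ls := by
  induction ls with
  | nil => simp
  | cons l ls ih =>
    intro out h
    have hl : '\n' ∉ l := h l (by simp)
    have hls : ∀ l' ∈ ls, '\n' ∉ l' := fun l' hl' => h l' (by simp [hl'])
    simp only [List.foldl_cons]
    rw [pvStep_shift out l hl, ih _ hls]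

-- B's char fold over the joined tail is the nested per-line fold
lemma pvJoin_fold (ls : List (List Char)) :
    ∀ out, List.foldl pvBStep out (ls.map (fun l => '\n' :: l)).flatten
      = List.foldl (fun o l => List.foldl pvBStep (pvBStep o '\n') l) out ls := by
  induction ls with
  | nil => simp
  | cons l ls ih =>
    intro out
    simp only [List.map_cons, List.flatten_cons, List.foldl_append, List.foldl_cons]
    exact ih _

-- A's loop body equals pvAStep
lemma pvAStep_eq (cp line : List Char) :
    (if PySem.Chars.endswith cp ['-'] then
        PySem.Chars.slice cp (some 0) (some ((PySem.Chars.len cp : Int) - 1)) ++ line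
      else cp ++ [' '] ++ line)
      = pvAStep cp line := by
  induction cp using List.reverseRecOn with
  | nil => simp [PySem.Chars.endswith, pvAStep]
  | append_singleton ys y _ =>
    have hend : PySem.Chars.endswith (ys ++ [y]) ['-'] = true ↔ y = '-' := by
      rw [PySem.Chars.endswith_iff]
      constructor
      · rintro ⟨t, ht⟩
        have := congrArg List.getLast? ht
        simpa using this.symm
      · rintro rfl; exact ⟨ys, rfl⟩
    have hlast : (ys ++ [y]).getLast? = some y := by simp
    have hslice : PySem.Chars.slice (ys ++ [y]) (some 0)
        (some ((PySem.Chars.len (ys ++ [y]) : Int) - 1)) = ys := by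
      have hlen : (PySem.Chars.len (ys ++ [y]) : Int) - 1 = ((ys.length : Nat) : Int) := by
        simp [PySem.Chars.len_eq]
      rw [hlen]
      rw [show PySem.Chars.slice (ys ++ [y]) (some 0) (some ((ys.length : Nat) : Int))
            = PySem.List.slice (ys ++ [y]) (some 0) (some ((ys.length : Nat) : Int)) by
          simp]
      rw [PySem.List.slice_zero_start, PySem.List.slice_to_natCast]
      simp
    by_cases hy : y = '-'
    · rw [if_pos (hend.mpr hy), hslice]
      simp [pvAStep, hy]
    · have : ¬ PySem.Chars.endswith (ys ++ [y]) ['-'] = true := fun h => hy (hend.mp h)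
      rw [if_neg this]
      simp [pvAStep, hlast, hy]

-- A's loop body, as a function
lemma pvAStep_fun :
    (fun (cleaned_para line : List Char) =>
      if PySem.Chars.endswith cleaned_para ['-'] then
        PySem.Chars.slice cleaned_para (some 0)
          (some ((PySem.Chars.len cleaned_para : Int) - 1)) ++ line
      else cleaned_para ++ [' '] ++ line) = pvAStep := by
  funext cp line
  exact pvAStep_eq cp line

-- strip ignores the one leading space A's first iteration adds
lemma pvStrip_space (cs : List Char) :
    PySem.Chars.strip (' ' :: cs) = PySem.Chars.strip cs := by
  simp [PySem.Chars.strip, PySem.Chars.lstrip,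
    show PySem.Chars.isspace ' ' = true from rfl]

-- ===== VERDICT (by name: the statement is the Claim_ definition above) =====
theorem sanitize_word_breaks___py_spec : Claim_equal_sanitize_word_breaks___py := by
  intro paragraph _
  unfold Spec_sanitize_word_breaks___py sanitize_word_breaks___py sanitize_word_breaks___py_alt
  rw [pvSplitOn_newline, pvAStep_fun]
  generalize paragraph.toList = cs
  obtain ⟨p, ps, hsplit⟩ := List.exists_cons_of_ne_nil (pvSplitNL_ne_nil cs)
  have hjoin := pvSplitNL_join cs
  have hnl := pvSplitNL_no_nl cs
  rw [hsplit] at hjoin hnl ⊢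
  simp only [List.headI_cons, List.tail_cons] at hjoin
  have hp : '\n' ∉ p := hnl p (by simp)
  have hps : ∀ l ∈ ps, '\n' ∉ l := fun l hl => hnl l (by simp [hl])
  have hA1 : pvAStep [] p = ' ' :: p := by simp [pvAStep]
  rw [List.foldl_cons, hA1, pvInv ps p hps]
  rw [hjoin, List.foldl_append, pvBStep_line p hp, List.nil_append, pvJoin_fold ps p]
  rw [pvStrip_space]
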